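-- pv_equiv track=rewrite | github.com/arctheowl/AndoverChess | scripts/update_from_lms.py | generate_fixtures_code
-- ===== SOURCE A (Python) =====
-- def generate_fixtures_code(new_fixtures: list[dict]) -> str:
--     if not new_fixtures:
--         return ''
--     parts = []
--     for f in new_fixtures:
--         parts.append(
--             "  {\n"
--             f"    id: \"{f.get('id','')}\",\n"
--             f"    season: \"{f.get('season','')}\",\n"
--             f"    homeTeam: \"{f.get('homeTeam','')}\",\n"
--             f"    awayTeam: \"{f.get('awayTeam','')}\",\n"
--             f"    date: \"{f.get('date','')}\",\n"
--             f"    time: \"{f.get('time','')}\",\n"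
--             f"    venue: \"{f.get('venue','')}\",\n"
--             f"    competition: \"{f.get('competition','')}\",\n"
--             f"    isTournament: {str(f.get('isTournament', False)).lower()},\n"
--             f"    status: \"{f.get('status','')}\",\n"
--             f"    result: \"{f.get('result','')}\",\n"
--             f"    score: \"{f.get('score','')}\",\n"
--             f"    notes: \"{f.get('notes','')}\",\n"
--             f"    venueKey: \"{f.get('venueKey','')}\"\n"
--             "  }"
--         )
--     return ",\n".join(parts)
-- ===== SOURCE B (Python) =====
-- SCHEMA = ['id', 'season', 'homeTeam', 'awayTeam', 'date', 'time', 'venue',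
--           'competition', 'isTournament', 'status', 'result', 'score', 'notes', 'venueKey']
--
--
-- def generate_fixtures_code(new_fixtures: list[dict]) -> str:
--     if not new_fixtures:
--         return ''
--     blocks = []
--     for f in new_fixtures:
--         lines = []
--         for key in SCHEMA:
--             if key == 'isTournament':
--                 lines.append(f"    isTournament: {str(f.get('isTournament', False)).lower()}")
--             else:
--                 lines.append(f"    {key}: \"{f.get(key, '')}\"")
--         blocks.append("  {\n" + ",\n".join(lines) + "\n  }")
--     return ",\n".join(blocks)
-- ===== Notes on version B (the rewrite author's own statement) =====
-- stated objective: simpler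
-- what changed: Replaces A's single hard-coded 14-field format string per fixture with a schema-driven decomposition: an ordered list of field keys, a per-field line builder (isTournament as the one unquoted case), and joins of the lines and blocks.
import Mathlib
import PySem

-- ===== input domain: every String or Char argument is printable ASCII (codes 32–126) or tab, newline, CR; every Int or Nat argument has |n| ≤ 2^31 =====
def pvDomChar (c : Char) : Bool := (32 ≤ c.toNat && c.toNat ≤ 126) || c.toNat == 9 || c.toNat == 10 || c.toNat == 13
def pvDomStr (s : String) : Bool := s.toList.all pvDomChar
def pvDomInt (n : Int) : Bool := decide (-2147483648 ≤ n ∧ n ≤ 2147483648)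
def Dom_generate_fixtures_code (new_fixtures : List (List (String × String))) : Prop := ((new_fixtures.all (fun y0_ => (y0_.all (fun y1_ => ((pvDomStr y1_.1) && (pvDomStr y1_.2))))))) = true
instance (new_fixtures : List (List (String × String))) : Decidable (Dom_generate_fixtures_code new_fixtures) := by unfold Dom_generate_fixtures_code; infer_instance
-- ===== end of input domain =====

-- Header: B replaces A's one hard-coded 14-field format string per fixture by a
-- schema-driven decomposition (a list of field keys, a per-field line builder, join);
-- objective: simpler. Byte-identical output proved below.


-- ===== PORT A =====
-- str(f.get('isTournament', False)).lower(): str of the bool default False is "False",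
-- str of a string value is itself; then Python str.lower = PySem.Str.lower.
def pvTournA (f : PySem.Dict String String) : String :=
  PySem.Str.lower (match f.get? "isTournament" with | some v => v | none => "False")

def pvBlockA (f : PySem.Dict String String) : String :=
  "  {\n    id: \"" ++ f.getD "id" "" ++
  "\",\n    season: \"" ++ f.getD "season" "" ++
  "\",\n    homeTeam: \"" ++ f.getD "homeTeam" "" ++
  "\",\n    awayTeam: \"" ++ f.getD "awayTeam" "" ++
  "\",\n    date: \"" ++ f.getD "date" "" ++
  "\",\n    time: \"" ++ f.getD "time" "" ++
  "\",\n    venue: \"" ++ f.getD "venue" "" ++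
  "\",\n    competition: \"" ++ f.getD "competition" "" ++
  "\",\n    isTournament: " ++ pvTournA f ++
  ",\n    status: \"" ++ f.getD "status" "" ++
  "\",\n    result: \"" ++ f.getD "result" "" ++
  "\",\n    score: \"" ++ f.getD "score" "" ++
  "\",\n    notes: \"" ++ f.getD "notes" "" ++
  "\",\n    venueKey: \"" ++ f.getD "venueKey" "" ++ "\"\n  }"

def generate_fixtures_code (new_fixtures : List (List (String × String))) : String :=
  if new_fixtures.isEmpty then ""
  else
    let parts := new_fixtures.foldl
      (fun acc f => acc ++ [pvBlockA (PySem.Dict.ofList f)]) []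
    PySem.Str.join ",\n" parts

-- ===== PORT B =====
def pvSchemaB : List String :=
  ["id", "season", "homeTeam", "awayTeam", "date", "time", "venue",
   "competition", "isTournament", "status", "result", "score", "notes", "venueKey"]

def pvLineB (f : PySem.Dict String String) (key : String) : String :=
  if key == "isTournament" then
    "    isTournament: " ++ PySem.Str.lower ((f.get? "isTournament").getD "False")
  else
    "    " ++ key ++ ": \"" ++ f.getD key "" ++ "\""

def pvBlockB (f : PySem.Dict String String) : String :=
  "  {\n" ++ PySem.Str.join ",\n" (pvSchemaB.map (pvLineB f)) ++ "\n  }"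

def generate_fixtures_code_alt (new_fixtures : List (List (String × String))) : String :=
  if new_fixtures.isEmpty then ""
  else PySem.Str.join ",\n" (new_fixtures.map (fun f => pvBlockB (PySem.Dict.ofList f)))

-- ===== PRECONDITION & SPEC =====
def Spec_generate_fixtures_code (new_fixtures : List (List (String × String))) (out : String) : Prop := out = generate_fixtures_code_alt new_fixtures
instance (new_fixtures : List (List (String × String))) (out : String) : Decidable (Spec_generate_fixtures_code new_fixtures out) := by unfold Spec_generate_fixtures_code; infer_instance

-- ===== CLAIM (what is proved, stated in full; the proofs are below) =====
def Claim_equal_generate_fixtures_code : Prop := ∀ (new_fixtures : List (List (String × String))), Dom_generate_fixtures_code new_fixtures → Spec_generate_fixtures_code new_fixtures (generate_fixtures_code new_fixtures)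

-- ===== LEMMAS AND PROOFS =====
theorem pvTourn_eq (f : PySem.Dict String String) :
    pvTournA f = PySem.Str.lower ((f.get? "isTournament").getD "False") := by
  unfold pvTournA
  cases f.get? "isTournament" <;> rfl

set_option maxRecDepth 4096 in
theorem pvBlock_eq (f : PySem.Dict String String) : pvBlockA f = pvBlockB f := by
  have h : (pvBlockA f).toList = (pvBlockB f).toList := by
    simp [pvBlockA, pvBlockB, pvSchemaB, pvLineB, pvTourn_eq, PySem.Str.join,
          PySem.Chars.join, String.toList_append, List.intercalate]
  exact String.toList_inj.mp h

-- ===== VERDICT (by name: the statement is the Claim_ definition above) =====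
theorem generate_fixtures_code_spec : Claim_equal_generate_fixtures_code := by
  intro xs _
  unfold Spec_generate_fixtures_code generate_fixtures_code generate_fixtures_code_alt
  simp only [PySem.List.foldl_append_singleton_eq_map, List.nil_append]
  simp [pvBlock_eq]
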